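-- pv_equiv track=rewrite | github.com/rbergm/PostBOUND | ues/topk-simulator.py | execute_join
-- ===== SOURCE A (Python) =====
-- import collections
-- from typing import Dict, List, Set, Iterator, Tuple, Union
--
-- def count_value_occurrences(attribute_values: List[str]) -> Dict[str, int]:
--     occurrence_counter = collections.defaultdict(int)
--     for val in attribute_values:
--         occurrence_counter[val] += 1
--     return occurrence_counter
--
-- def execute_join(tuples_r: List[str], tuples_s: List[str]) -> int:
--     output_cardinality = 0
--     occurrences_r = count_value_occurrences(tuples_r)
--     occurrences_s = count_value_occurrences(tuples_s)
--
--     for value, count_r in occurrences_r.items():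
--         count_s = occurrences_s.get(value, 0)
--         output_cardinality += count_r * count_s
--
--     return output_cardinality
-- ===== SOURCE B (Python) =====
-- def execute_join(tuples_r, tuples_s):
--     occurrences_s = {}
--     for val in tuples_s:
--         occurrences_s[val] = occurrences_s.get(val, 0) + 1
--     total = 0
--     for val in tuples_r:
--         total += occurrences_s.get(val, 0)
--     return total
-- ===== Notes on version B (the rewrite author's own statement) =====
-- stated objective: alternative
-- what changed: B builds an occurrence count only for tuples_s and streams over the raw tuples_r, adding occurrences_s.get(v, 0) per element, instead of A's grouping both sides into counters and summing count_r*count_s over distinct keys.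
import Mathlib
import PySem

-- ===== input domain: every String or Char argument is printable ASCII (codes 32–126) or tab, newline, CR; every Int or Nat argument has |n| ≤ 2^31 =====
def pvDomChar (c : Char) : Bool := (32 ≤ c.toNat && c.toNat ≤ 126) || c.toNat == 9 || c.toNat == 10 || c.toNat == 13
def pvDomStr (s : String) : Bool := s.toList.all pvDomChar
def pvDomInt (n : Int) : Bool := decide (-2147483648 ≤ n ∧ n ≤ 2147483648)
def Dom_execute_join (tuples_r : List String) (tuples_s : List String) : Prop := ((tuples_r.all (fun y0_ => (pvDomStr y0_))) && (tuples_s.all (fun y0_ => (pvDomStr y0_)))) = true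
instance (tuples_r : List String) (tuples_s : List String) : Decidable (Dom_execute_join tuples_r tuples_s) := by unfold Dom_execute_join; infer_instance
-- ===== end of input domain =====

-- B indexes only tuples_s and streams raw tuples_r (A groups both sides and scans distinct keys); same result, one counter fewer.
-- ===== PORT A =====
def count_value_occurrences (attribute_values : List String) : PySem.Dict String Int :=
  attribute_values.foldl (fun d val => d.modify val 0 (· + 1)) PySem.Dict.empty

def execute_join (tuples_r : List String) (tuples_s : List String) : Int :=
  let occurrences_r := count_value_occurrences tuples_r
  let occurrences_s := count_value_occurrences tuples_s
  occurrences_r.items.foldl (fun acc p => acc + p.2 * occurrences_s.getD p.1 0) 0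

-- ===== PORT B =====
def execute_join_alt (tuples_r : List String) (tuples_s : List String) : Int :=
  let occurrences_s := tuples_s.foldl (fun d val => d.insert val (d.getD val 0 + 1)) PySem.Dict.empty
  tuples_r.foldl (fun acc val => acc + occurrences_s.getD val 0) 0

-- ===== PRECONDITION & SPEC =====
def Spec_execute_join (tuples_r : List String) (tuples_s : List String) (out : Int) : Prop := out = execute_join_alt tuples_r tuples_s
instance (tuples_r : List String) (tuples_s : List String) (out : Int) : Decidable (Spec_execute_join tuples_r tuples_s out) := by unfold Spec_execute_join; infer_instance

-- ===== CLAIM (what is proved, stated in full; the proofs are below) =====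
def Claim_equal_execute_join : Prop := ∀ (tuples_r : List String) (tuples_s : List String), Dom_execute_join tuples_r tuples_s → Spec_execute_join tuples_r tuples_s (execute_join tuples_r tuples_s)

-- ===== LEMMAS AND PROOFS =====
-- sum over a nodup list of (if k = v then c k else 0) collapses to c v
theorem sum_if_eq (ks : List String) (v : String) (c : String → Int)
    (hnd : ks.Nodup) (hv : v ∈ ks) :
    (ks.map (fun k => if k = v then c k else 0)).sum = c v := by
  induction ks with
  | nil => cases hv
  | cons a ks ih =>
    simp only [List.map_cons, List.sum_cons]
    rcases List.nodup_cons.mp hnd with ⟨ha, hnd'⟩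
    rcases List.mem_cons.mp hv with h | h
    · subst h
      have hz : (ks.map (fun k => if k = v then c k else 0)).sum = 0 := by
        apply List.sum_eq_zero
        intro x hx
        rcases List.mem_map.mp hx with ⟨k, hk, rfl⟩
        have hkv : k ≠ v := fun e => ha (e ▸ hk)
        simp [hkv]
      simp [hz]
    · have hna : a ≠ v := fun e => ha (e ▸ h)
      rw [ih hnd' h]
      simp [hna]

-- sum of count(r,k)*c k over a nodup cover of r equals the elementwise sum over r
theorem sum_count_mul (ks : List String) (c : String → Int) (r : List String)
    (hnd : ks.Nodup) (hcov : ∀ v ∈ r, v ∈ ks) :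
    (ks.map (fun k => (r.count k : Int) * c k)).sum = (r.map c).sum := by
  induction r with
  | nil => simp
  | cons v r ih =>
    have hsplit : (ks.map (fun k => ((v :: r).count k : Int) * c k)).sum
        = (ks.map (fun k => (r.count k : Int) * c k)).sum
          + (ks.map (fun k => if k = v then c k else 0)).sum := by
      rw [← List.sum_map_add]
      apply congrArg List.sum
      apply List.map_congr_left
      intro k hk
      by_cases h : k = v
      · subst h
        rw [List.count_cons_self]
        push_cast
        simp
        ring
      · rw [List.count_cons_of_ne (Ne.symm h)]
        simp [h]
    rw [hsplit, ih (fun x hx => hcov x (List.mem_cons_of_mem _ hx)),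
        sum_if_eq ks v c hnd (hcov v (List.mem_cons_self ..))]
    simp [add_comm]


-- ===== VERDICT (by name: the statement is the Claim_ definition above) =====
theorem execute_join_spec : Claim_equal_execute_join := by
  intro r s _
  unfold Spec_execute_join execute_join execute_join_alt count_value_occurrences
  rw [← PySem.Dict.counter_eq_foldl, ← PySem.Dict.counter_eq_foldl,
      PySem.List.foldl_add, PySem.List.foldl_add,
      PySem.Dict.items_counter, List.map_map]
  simp only [PySem.Dict.getD_counter, PySem.Dict.getD_foldl_insert_add_one,
    PySem.Dict.getD_empty, Function.comp_def, zero_add]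
  exact sum_count_mul (PySem.Set.ofList r) (fun k => (s.count k : Int)) r
      (PySem.Set.nodup_ofList r) (fun v hv => (PySem.Set.mem_ofList r v).mpr hv)
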